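-- pv_equiv track=rewrite | github.com/GitPistachio/Competitive-programming | IIITD1 - Those College Days!/Those College Days!.py | MSDF
-- ===== SOURCE A (Python) =====
-- def MSDF(n):
--     if n < 0:
--         n = -n
--
--     msd = n
--     factor = 1
--     while (msd >= 10):
--         msd = msd // 10
--         factor *= 10
--
--     return factor
-- ===== SOURCE B (Python) =====
-- def MSDF(n):
--     return 10 ** (len(str(abs(n))) - 1)
-- ===== Notes on version B (the rewrite author's own statement) =====
-- stated objective: simpler
-- what changed: Replaces A's divide-by-ten loop with its accumulating factor by a one-line closed form: 10 raised to (decimal digit count of abs(n) minus one), the digit count read off as len(str(abs(n))).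
import Mathlib
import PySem

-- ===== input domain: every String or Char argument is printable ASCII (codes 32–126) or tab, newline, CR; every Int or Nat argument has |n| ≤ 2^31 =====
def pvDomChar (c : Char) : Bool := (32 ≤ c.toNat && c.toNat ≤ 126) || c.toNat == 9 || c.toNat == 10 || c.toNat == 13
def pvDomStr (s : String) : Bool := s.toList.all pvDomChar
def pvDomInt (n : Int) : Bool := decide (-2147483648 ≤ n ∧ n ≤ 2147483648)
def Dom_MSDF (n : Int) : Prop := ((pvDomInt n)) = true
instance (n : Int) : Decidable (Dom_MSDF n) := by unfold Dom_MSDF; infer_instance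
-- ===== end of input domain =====

-- B replaces A's divide-by-ten loop by the closed form 10^(len(str(abs n)) - 1) (simpler).

-- ===== PORT A =====
-- while (msd >= 10): msd = msd // 10; factor *= 10
def MSDFloop (msd factor : Int) : Int :=
  if 10 ≤ msd then MSDFloop (PySem.Int.floordiv msd 10) (factor * 10) else factor
  termination_by msd.toNat
  decreasing_by
    simp only [PySem.Int.floordiv]
    rw [Int.fdiv_eq_ediv_of_nonneg _ (by omega)]
    omega

def MSDF (n : Int) : Int :=
  let n := if n < 0 then -n else n
  MSDFloop n 1

-- ===== PORT B =====
-- 10 ** (len(str(abs(n))) - 1); the exponent len-1 is ≥ 0 so '.toNat' is exact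
def MSDF_alt (n : Int) : Int :=
  10 ^ (PySem.Str.len (PySem.Int.toStr (if n < 0 then -n else n)) - 1).toNat

-- ===== PRECONDITION & SPEC =====
def Spec_MSDF (n : Int) (out : Int) : Prop := out = MSDF_alt n
instance (n : Int) (out : Int) : Decidable (Spec_MSDF n out) := by unfold Spec_MSDF; infer_instance

-- ===== CLAIM (what is proved, stated in full; the proofs are below) =====
def Claim_equal_MSDF : Prop := ∀ (n : Int), Dom_MSDF n → Spec_MSDF n (MSDF n)

-- ===== LEMMAS AND PROOFS =====

-- length of Nat.toDigits is fuel-independent given enough fuel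
lemma pv_toDigitsCore_len_fuel (m : Nat) : ∀ (f₁ f₂ : Nat), m < f₁ → m < f₂ →
    (Nat.toDigitsCore 10 f₁ m []).length = (Nat.toDigitsCore 10 f₂ m []).length := by
  induction m using Nat.strong_induction_on with
  | _ m ih =>
    intro f₁ f₂ h₁ h₂
    match f₁, f₂ with
    | f₁+1, f₂+1 =>
      simp only [Nat.toDigitsCore]
      by_cases h : m / 10 = 0
      · simp [h]
      · simp only [h, if_false]
        rw [Nat.toDigitsCore_lens_eq, Nat.toDigitsCore_lens_eq]
        have hm : m / 10 < m := Nat.div_lt_self (by omega) (by omega)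
        have hd : m / 10 < f₁ ∧ m / 10 < f₂ := by omega
        rw [ih (m / 10) hm f₁ f₂ hd.1 hd.2]

lemma pv_len_small {m : Nat} (h : m < 10) : (Nat.toDigits 10 m).length = 1 := by
  interval_cases m <;> decide

lemma pv_len_step {m : Nat} (h : 10 ≤ m) :
    (Nat.toDigits 10 m).length = (Nat.toDigits 10 (m / 10)).length + 1 := by
  unfold Nat.toDigits
  conv_lhs => rw [show m + 1 = m + 1 from rfl]
  simp only [Nat.toDigitsCore]
  have h10 : m / 10 ≠ 0 := by omega
  simp only [h10, if_false]
  rw [Nat.toDigitsCore_lens_eq]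
  congr 1
  exact pv_toDigitsCore_len_fuel (m / 10) m (m / 10 + 1)
    (Nat.div_lt_self (by omega) (by omega)) (Nat.lt_succ_self _)

lemma pv_len_pos (m : Nat) : 1 ≤ (Nat.toDigits 10 m).length := by
  induction m using Nat.strong_induction_on with
  | _ m ih =>
    by_cases h : m < 10
    · rw [pv_len_small h]
    · rw [pv_len_step (by omega)]; omega

-- A's loop returns factor * 10^(digits(msd) - 1) for nonnegative msd
lemma pv_loop_eq (k : Nat) : ∀ (msd : Int), 0 ≤ msd → msd.toNat = k → ∀ factor : Int,
    MSDFloop msd factor = factor * 10 ^ ((Nat.toDigits 10 msd.toNat).length - 1) := by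
  induction k using Nat.strong_induction_on with
  | _ k ih => ?_
  intro msd h hk factor
  rw [MSDFloop]
  by_cases hge : 10 ≤ msd
  · simp only [hge, if_true]
    have hfd : PySem.Int.floordiv msd 10 = ((msd.toNat / 10 : Nat) : Int) := by
      simp only [PySem.Int.floordiv]
      rw [Int.fdiv_eq_ediv_of_nonneg _ (by omega)]
      omega
    have htn : (PySem.Int.floordiv msd 10).toNat = msd.toNat / 10 := by rw [hfd]; omega
    rw [ih (msd.toNat / 10) (by omega) _ (by rw [hfd]; positivity) htn]
    rw [htn]
    rw [pv_len_step (by omega : 10 ≤ msd.toNat)]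
    have hp := pv_len_pos (msd.toNat / 10)
    rw [show (Nat.toDigits 10 (msd.toNat / 10)).length + 1 - 1
          = ((Nat.toDigits 10 (msd.toNat / 10)).length - 1) + 1 by omega]
    ring
  · simp only [hge, if_false]
    rw [pv_len_small (by omega : msd.toNat < 10)]
    simp

-- ===== VERDICT (by name: the statement is the Claim_ definition above) =====
theorem MSDF_spec : Claim_equal_MSDF := by
  intro n _
  unfold Spec_MSDF MSDF MSDF_alt
  set m := if n < 0 then -n else n with hm
  have hm0 : 0 ≤ m := by rw [hm]; split <;> omega
  rw [pv_loop_eq m.toNat m hm0 rfl 1, one_mul]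
  have hchars : (PySem.Int.toStr m).toList = Nat.toDigits 10 m.toNat := by
    rw [PySem.Int.toList_toStr]
    simp [PySem.Int.toChars, not_lt.mpr hm0]
  rw [PySem.Str.len_eq, hchars]
  have hp := pv_len_pos m.toNat
  congr 1
  omega
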